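-- pv_equiv track=rewrite | github.com/stenknutsen/HomeGrownPOSTagger | PhaseThreeTagging.py | N_that_V_WDTTagger
-- ===== SOURCE A (Python) =====
-- def N_that_V_WDTTagger(sent):
--     sentToReturn = []
--     skip = 0
--
--     for i in range(len(sent)):
--
--         if skip>0:
--             skip = skip -1
--             continue
--
--         if (i)<0 | (i+2)>=len(sent):
--             sentToReturn += [sent[i]]
--             continue
--
--         leftContext = sent[i]
--         target = sent[i+1]
--         rightContext = sent[i+2]
--
--         if (leftContext[1].startswith("N"))&(rightContext[1].startswith("V"))&(target[1]=="UNK")&(target[0].lower()=="that"):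
--
--             sentToReturn += [leftContext]
--             sentToReturn += [(target[0],"WDT")]
--             sentToReturn += [rightContext]
--             skip = 2
--
--         else:
--             sentToReturn += [leftContext]
--
--     return sentToReturn
-- ===== SOURCE B (Python) =====
-- def N_that_V_WDTTagger(sent):
--     n = len(sent)
--     out = []
--     for p in range(n):
--         word, tag = sent[p]
--         if (1 <= p <= n - 2 and tag == "UNK" and word.lower() == "that"
--                 and sent[p - 1][1].startswith("N")
--                 and sent[p + 1][1].startswith("V")):
--             out.append((word, "WDT"))
--         else:
--             out.append(sent[p])
--     return out
-- ===== Notes on version B (the rewrite author's own statement) =====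
-- stated objective: simpler
-- what changed: Replaced the windowed scan with a skip counter by a single uniform per-position map: each token is retagged WDT exactly when it is an interior UNK 'that' with an N-tagged left neighbor and a V-tagged right neighbor (matched windows cannot overlap, so the skip machinery is unnecessary).
import Mathlib
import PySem

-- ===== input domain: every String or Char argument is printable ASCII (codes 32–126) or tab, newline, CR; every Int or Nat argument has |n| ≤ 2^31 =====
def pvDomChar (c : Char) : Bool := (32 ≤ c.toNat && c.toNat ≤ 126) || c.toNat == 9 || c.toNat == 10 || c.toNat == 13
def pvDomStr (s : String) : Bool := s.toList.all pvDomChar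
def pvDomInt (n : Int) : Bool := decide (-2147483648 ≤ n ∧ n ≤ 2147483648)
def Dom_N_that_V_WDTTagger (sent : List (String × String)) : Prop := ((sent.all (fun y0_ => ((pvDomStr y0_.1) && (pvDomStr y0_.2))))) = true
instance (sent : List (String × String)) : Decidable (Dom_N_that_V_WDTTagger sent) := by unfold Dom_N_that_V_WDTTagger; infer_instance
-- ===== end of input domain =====

-- B replaces A's windowed scan with a skip counter by one uniform per-position map (simpler decomposition; same O(n) cost).

-- ===== PORT A =====
-- A's window-match condition at window start i (the `&`-joined test in A, all four conjuncts evaluated).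
def pvCondA (sent : List (String × String)) (i : Nat) : Bool :=
  PySem.Str.startswith (sent.getD i ("", "")).2 "N" &&
  PySem.Str.startswith (sent.getD (i + 2) ("", "")).2 "V" &&
  ((sent.getD (i + 1) ("", "")).2 == "UNK") &&
  (PySem.Str.lower (sent.getD (i + 1) ("", "")).1 == "that")

-- One loop iteration of A; state = (sentToReturn, skip).  All indexing is in range
-- (guarded by the edge test), so `getD` is Python-exact here.
-- Python's `(i)<0 | (i+2)>=len(sent)` parses as the chain `i < (0|(i+2)) >= len(sent)`,
-- i.e. `i < i+2 and i+2 >= len(sent)`; for i ≥ 0 that is exactly `i+2 ≥ len(sent)`.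
def pvStepA (sent : List (String × String)) (st : List (String × String) × Nat) (i : Nat) :
    List (String × String) × Nat :=
  if st.2 > 0 then (st.1, st.2 - 1)
  else if i + 2 ≥ sent.length then (st.1 ++ [sent.getD i ("", "")], st.2)
  else if pvCondA sent i then
    (st.1 ++ [sent.getD i ("", ""), ((sent.getD (i + 1) ("", "")).1, "WDT"), sent.getD (i + 2) ("", "")], 2)
  else (st.1 ++ [sent.getD i ("", "")], st.2)

def N_that_V_WDTTagger (sent : List (String × String)) : List (String × String) :=
  ((List.range sent.length).foldl (pvStepA sent) ([], 0)).1

-- ===== PORT B =====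
-- B's per-position retag condition (the single `and`-joined test in Source B).
def pvCondB (sent : List (String × String)) (p : Nat) : Bool :=
  decide (1 ≤ p) && decide (p ≤ sent.length - 2) &&
  ((sent.getD p ("", "")).2 == "UNK") &&
  (PySem.Str.lower (sent.getD p ("", "")).1 == "that") &&
  PySem.Str.startswith (sent.getD (p - 1) ("", "")).2 "N" &&
  PySem.Str.startswith (sent.getD (p + 1) ("", "")).2 "V"

def N_that_V_WDTTagger_alt (sent : List (String × String)) : List (String × String) :=
  (List.range sent.length).map (fun p =>
    if pvCondB sent p then ((sent.getD p ("", "")).1, "WDT") else sent.getD p ("", ""))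

-- ===== PRECONDITION & SPEC =====
def Spec_N_that_V_WDTTagger (sent : List (String × String)) (out : List (String × String)) : Prop := out = N_that_V_WDTTagger_alt sent
instance (sent : List (String × String)) (out : List (String × String)) : Decidable (Spec_N_that_V_WDTTagger sent out) := by unfold Spec_N_that_V_WDTTagger; infer_instance

-- ===== CLAIM (what is proved, stated in full; the proofs are below) =====
def Claim_equal_N_that_V_WDTTagger : Prop := ∀ (sent : List (String × String)), Dom_N_that_V_WDTTagger sent → Spec_N_that_V_WDTTagger sent (N_that_V_WDTTagger sent)

-- ===== LEMMAS AND PROOFS =====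

-- Output of A's loop from position i onward with the given skip counter.
def pvGoA (sent : List (String × String)) (i skip : Nat) : List (String × String) :=
  if _h : i < sent.length then
    if skip > 0 then pvGoA sent (i + 1) (skip - 1)
    else if i + 2 ≥ sent.length then sent.getD i ("", "") :: pvGoA sent (i + 1) 0
    else if pvCondA sent i then
      sent.getD i ("", "") :: ((sent.getD (i + 1) ("", "")).1, "WDT") :: sent.getD (i + 2) ("", "")
        :: pvGoA sent (i + 1) 2
    else sent.getD i ("", "") :: pvGoA sent (i + 1) 0
  else []
termination_by sent.length - i

-- Output of B's map from position i onward.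
def pvGoB (sent : List (String × String)) (i : Nat) : List (String × String) :=
  if _h : i < sent.length then
    (if pvCondB sent i then ((sent.getD i ("", "")).1, "WDT") else sent.getD i ("", "")) :: pvGoB sent (i + 1)
  else []
termination_by sent.length - i

lemma pvFoldA (sent : List (String × String)) :
    ∀ (d i : Nat) (acc : List (String × String)) (skip : Nat), d = sent.length - i →
      ((List.range' i d).foldl (pvStepA sent) (acc, skip)).1 = acc ++ pvGoA sent i skip := by
  intro d
  induction d with
  | zero =>
    intro i acc skip hd
    rw [pvGoA, dif_neg (by omega)]; simp
  | succ d ih =>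
    intro i acc skip hd
    have hi : i < sent.length := by omega
    rw [List.range'_succ, List.foldl_cons, pvGoA, dif_pos hi]
    cases skip with
    | succ s =>
      rw [show pvStepA sent (acc, s + 1) i = (acc, s) from by simp [pvStepA]]
      simpa using ih (i + 1) acc s (by omega)
    | zero =>
      by_cases he : i + 2 ≥ sent.length
      · rw [show pvStepA sent (acc, 0) i = (acc ++ [sent.getD i ("", "")], 0) from by
          simp [pvStepA, he]]
        rw [if_neg (by omega), if_pos he, ih (i + 1) _ 0 (by omega)]
        simp
      · by_cases hc : pvCondA sent i = true
        · rw [show pvStepA sent (acc, 0) i =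
            (acc ++ [sent.getD i ("", ""), ((sent.getD (i + 1) ("", "")).1, "WDT"),
              sent.getD (i + 2) ("", "")], 2) from by simp [pvStepA, he, hc]]
          rw [if_neg (by omega), if_neg he, if_pos hc, ih (i + 1) _ 2 (by omega)]
          simp
        · rw [show pvStepA sent (acc, 0) i = (acc ++ [sent.getD i ("", "")], 0) from by
            simp [pvStepA, he, hc]]
          rw [if_neg (by omega), if_neg he, if_neg hc, ih (i + 1) _ 0 (by omega)]
          simp

lemma pvMapB (sent : List (String × String)) :
    ∀ (d i : Nat), d = sent.length - i →
      ((List.range' i d).map (fun p =>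
        if pvCondB sent p then ((sent.getD p ("", "")).1, "WDT") else sent.getD p ("", "")))
        = pvGoB sent i := by
  intro d
  induction d with
  | zero =>
    intro i hd
    rw [pvGoB, dif_neg (by omega)]; simp
  | succ d ih =>
    intro i hd
    rw [List.range'_succ, List.map_cons, pvGoB, dif_pos (by omega), ih (i + 1) (by omega)]

-- a tag starting with "V" is not "UNK"
lemma pvV_ne_UNK (t : String) (h : PySem.Str.startswith t "V" = true) : (t == "UNK") = false := by
  by_contra hc
  have ht : t = "UNK" := by simpa using (Bool.of_not_eq_false hc)
  subst ht; exact absurd h (by decide)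

-- a tag cannot start with both "N" and "V"
lemma pvN_V (t : String) (hn : PySem.Str.startswith t "N" = true)
    (hv : PySem.Str.startswith t "V" = true) : False := by
  rw [PySem.Str.startswith_eq, PySem.Chars.startswith_iff] at hn hv
  obtain ⟨t1, h1⟩ := hn; obtain ⟨t2, h2⟩ := hv
  simp at h1
  rw [← h1] at h2
  simp at h2

-- interior bridge: B's condition at the window's center equals A's window condition
lemma pvBridge (sent : List (String × String)) (i : Nat) (h : i + 2 < sent.length) :
    pvCondB sent (i + 1) = pvCondA sent i := by
  have h2 : (i + 1 ≤ sent.length - 2) := by omega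
  simp only [pvCondA, pvCondB, Nat.add_sub_cancel, decide_eq_true (Nat.le_add_left 1 i), h2,
    decide_true, Bool.true_and, show i + 1 + 1 = i + 2 from rfl]
  cases PySem.Str.startswith (sent.getD i ("", "")).2 "N" <;>
    cases PySem.Str.startswith (sent.getD (i + 2) ("", "")).2 "V" <;>
    cases ((sent.getD (i + 1) ("", "")).2 == "UNK") <;> simp

lemma pvMain (sent : List (String × String)) :
    ∀ (d i : Nat), d = sent.length - i → pvCondB sent i = false →
      pvGoA sent i 0 = pvGoB sent i := by
  intro d
  induction d using Nat.strong_induction_on with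
  | _ d ih =>
    intro i hd hB
    by_cases hi : i < sent.length
    · rw [pvGoB, dif_pos hi, if_neg (by simp [hB]), pvGoA, dif_pos hi, if_neg (by omega)]
      by_cases he : i + 2 ≥ sent.length
      · rw [if_pos he]
        congr 1
        exact ih (sent.length - (i + 1)) (by omega) (i + 1) rfl
          (by simp [pvCondB, show ¬(i + 1 ≤ sent.length - 2) from by omega])
      · by_cases hc : pvCondA sent i = true
        · have hV : PySem.Str.startswith (sent.getD (i + 2) ("", "")).2 "V" = true := by
            simp only [pvCondA, Bool.and_eq_true] at hc
            exact hc.1.1.2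
          rw [if_neg he, if_pos hc]
          rw [pvGoA, dif_pos (show i + 1 < sent.length from by omega), if_pos (by omega)]
          rw [pvGoA, dif_pos (show i + 2 < sent.length from by omega), if_pos (by omega)]
          rw [pvGoB, dif_pos (show i + 1 < sent.length from by omega),
            if_pos (by rw [pvBridge sent i (by omega)]; exact hc)]
          have hB2 : pvCondB sent (i + 2) = false := by
            have h3 := pvV_ne_UNK _ hV
            simp only [pvCondB, h3, Bool.and_false, Bool.false_and]
          rw [pvGoB, dif_pos (show i + 2 < sent.length from by omega),
            if_neg (by rw [show i + 1 + 1 = i + 2 from rfl]; simp [hB2])]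
          have hB3 : pvCondB sent (i + 3) = false := by
            by_contra hc3
            have hc3 : pvCondB sent (i + 3) = true := by simpa using (Bool.of_not_eq_false hc3)
            simp only [pvCondB, Bool.and_eq_true, show i + 3 - 1 = i + 2 from rfl] at hc3
            exact pvN_V _ hc3.1.2 hV
          rw [show i + 1 + 1 = i + 2 from rfl, show i + 2 + 1 = i + 3 from rfl]
          exact congrArg₂ _ rfl (congrArg₂ _ rfl (congrArg₂ _ rfl
            (ih (sent.length - (i + 3)) (by omega) (i + 3) rfl hB3)))
        · rw [if_neg he, if_neg hc]
          congr 1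
          exact ih (sent.length - (i + 1)) (by omega) (i + 1) rfl
            (by rw [pvBridge sent i (by omega)]; simpa using hc)
    · rw [pvGoA, dif_neg hi, pvGoB, dif_neg hi]

-- ===== VERDICT (by name: the statement is the Claim_ definition above) =====
theorem N_that_V_WDTTagger_spec : Claim_equal_N_that_V_WDTTagger := by
  intro sent _
  unfold Spec_N_that_V_WDTTagger N_that_V_WDTTagger N_that_V_WDTTagger_alt
  rw [List.range_eq_range', pvFoldA sent sent.length 0 [] 0 (by omega),
      pvMapB sent sent.length 0 (by omega)]
  simp [pvMain sent (sent.length) 0 (by omega) (by simp [pvCondB])]
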